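-- pv_equiv track=rewrite | github.com/ni3do/arb_opp_dex | graph.py | sort_cycles
-- ===== SOURCE A (Python) =====
-- def sort_cycles(cycles):
--     srt_cycles = []
--     coins = ["ETH", "USDC", "USDT", "DAI", "WBTC", "UNI", "SUSHI"]
--
--     for cycle in cycles:
--         rotated_cycle = []
--         for coin in coins:
--             if len(rotated_cycle) != 0:
--                 break
--             if coin in cycle:
--                 counter = 0
--                 for c in cycle:
--                     if coin == c:
--                         for i in range(len(cycle)):
--                             rotated_cycle.append(cycle[(counter + i) % len(cycle)])
--                         break
--                     counter += 1
--         srt_cycles.append(rotated_cycle)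
--     return sorted(srt_cycles)
-- ===== SOURCE B (Python) =====
-- def sort_cycles(cycles):
--     rank = {c: i for i, c in enumerate(["ETH", "USDC", "USDT", "DAI", "WBTC", "UNI", "SUSHI"])}
--     out = []
--     for cycle in cycles:
--         best = None
--         for i, c in enumerate(cycle):
--             r = rank.get(c)
--             if r is not None and (best is None or r < best[0]):
--                 best = (r, i)
--         if best is None:
--             out.append([])
--         else:
--             s = best[1]
--             out.append(cycle[s:] + cycle[:s])
--     return sorted(out)
-- ===== Notes on version B (the rewrite author's own statement) =====
-- stated objective: simpler
-- what changed: B replaces A's triple-nested scan (priority loop with early-exit, manual counter scan for the first occurrence, modular-index append loop) by one argmin pass per cycle over a precomputed rank dict plus a slice rotation cycle[s:]+cycle[:s].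
import Mathlib
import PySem

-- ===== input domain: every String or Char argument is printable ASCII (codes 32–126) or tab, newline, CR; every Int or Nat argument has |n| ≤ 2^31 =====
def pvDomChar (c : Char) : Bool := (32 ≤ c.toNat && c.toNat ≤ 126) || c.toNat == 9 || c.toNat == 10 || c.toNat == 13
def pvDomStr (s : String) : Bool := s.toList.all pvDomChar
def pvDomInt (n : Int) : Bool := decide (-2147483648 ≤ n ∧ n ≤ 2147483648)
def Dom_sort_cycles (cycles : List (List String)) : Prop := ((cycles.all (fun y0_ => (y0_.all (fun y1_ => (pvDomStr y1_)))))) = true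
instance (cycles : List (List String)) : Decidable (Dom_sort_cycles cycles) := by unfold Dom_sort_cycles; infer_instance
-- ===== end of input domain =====

-- B replaces A's triple-nested scan per cycle (priority loop with early exit, counter scan,
-- modular-index append loop) by one argmin pass over a rank dict plus a slice rotation: simpler.

-- ===== PORT A =====
def pvCoins : List String := ["ETH", "USDC", "USDT", "DAI", "WBTC", "UNI", "SUSHI"]

-- 'for i in range(len(cycle)): rotated_cycle.append(cycle[(counter + i) % len(cycle)])'
-- (the index (counter+i) % len is always in range here, so the total pyGetD is exact)
def pvRotBuild (cycle : List String) (counter : Int) : List String :=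
  (PySem.List.pyRange 0 (cycle.length : Int) 1).foldl
    (fun acc i =>
      acc ++ [PySem.List.pyGetD cycle (PySem.Int.mod (counter + i) (cycle.length : Int)) ""]) []

-- 'counter = 0; for c in cycle: if coin == c: <append loop>; break; counter += 1'
def pvFindRot (coin : String) (cycle : List String) : List String → Int → List String
  | [], _ => []
  | c :: rest, counter =>
      if coin = c then pvRotBuild cycle counter
      else pvFindRot coin cycle rest (counter + 1)

-- body of 'for coin in coins' (the break on a nonempty rotated_cycle becomes the identity)
def pvCoinStep (cycle : List String) (rot : List String) (coin : String) : List String :=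
  if rot.length ≠ 0 then rot
  else if coin ∈ cycle then pvFindRot coin cycle cycle 0
  else rot

def pvRotA (cycle : List String) : List String := pvCoins.foldl (pvCoinStep cycle) []

def sort_cycles (cycles : List (List String)) : List (List String) :=
  PySem.List.sorted (cycles.foldl (fun srt cycle => srt ++ [pvRotA cycle]) []) (fun x => x) false

-- ===== PORT B =====
-- rank = {c: i for i, c in enumerate([...])}
def pvRank : PySem.Dict String Int :=
  (PySem.List.enumerate ["ETH", "USDC", "USDT", "DAI", "WBTC", "UNI", "SUSHI"] 0).foldl
    (fun d p => d.insert p.2 p.1) PySem.Dict.empty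

-- 'r = rank.get(c); if r is not None and (best is None or r < best[0]): best = (r, i)'
def pvBestStep (best : Option (Int × Int)) (p : Int × String) : Option (Int × Int) :=
  match pvRank.get? p.2 with
  | none => best
  | some r =>
    match best with
    | none => some (r, p.1)
    | some b => if r < b.1 then some (r, p.1) else best

def pvBest (cycle : List String) : Option (Int × Int) :=
  (PySem.List.enumerate cycle 0).foldl pvBestStep none

-- 's = best[1]; out.append(cycle[s:] + cycle[:s])'
def pvRotB (cycle : List String) : List String :=
  match pvBest cycle with
  | none => []
  | some b => PySem.List.slice cycle (some b.2) none ++ PySem.List.slice cycle none (some b.2)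

def sort_cycles_alt (cycles : List (List String)) : List (List String) :=
  PySem.List.sorted (cycles.foldl (fun out cycle => out ++ [pvRotB cycle]) []) (fun x => x) false

-- ===== PRECONDITION & SPEC =====
def Spec_sort_cycles (cycles : List (List String)) (out : List (List String)) : Prop := out = sort_cycles_alt cycles
instance (cycles : List (List String)) (out : List (List String)) : Decidable (Spec_sort_cycles cycles out) := by unfold Spec_sort_cycles; infer_instance

-- ===== CLAIM (what is proved, stated in full; the proofs are below) =====
def Claim_equal_sort_cycles : Prop := ∀ (cycles : List (List String)), Dom_sort_cycles cycles → Spec_sort_cycles cycles (sort_cycles cycles)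

-- ===== LEMMAS AND PROOFS =====

-- the seven ranks, read off the literal dict
lemma pvRank_cases (c : String) (r : Int) (h : pvRank.get? c = some r) :
    (c = "ETH" ∧ r = 0) ∨ (c = "USDC" ∧ r = 1) ∨ (c = "USDT" ∧ r = 2) ∨ (c = "DAI" ∧ r = 3) ∨
    (c = "WBTC" ∧ r = 4) ∨ (c = "UNI" ∧ r = 5) ∨ (c = "SUSHI" ∧ r = 6) := by
  have hd : pvRank = PySem.Dict.mk
      [("ETH", (0 : Int)), ("USDC", 1), ("USDT", 2), ("DAI", 3), ("WBTC", 4), ("UNI", 5), ("SUSHI", 6)] := by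
    rfl
  rw [hd] at h
  simp only [PySem.Dict.get?_mk_cons] at h
  split_ifs at h with h1 h2 h3 h4 h5 h6 h7 <;> simp_all <;> tauto

-- the modular-index append loop builds the rotation drop/take
lemma pvRotBuild_eq (cycle : List String) (s : Nat) (hs : s < cycle.length) :
    pvRotBuild cycle (s : Int) = cycle.drop s ++ cycle.take s := by
  rw [← List.rotate_eq_drop_append_take (le_of_lt hs)]
  unfold pvRotBuild
  rw [PySem.List.foldl_append_singleton_eq_map, PySem.List.pyRange_one]
  rw [List.map_map]
  apply List.ext_getElem
  · simp
  · intro p hp hp'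
    simp only [List.nil_append, List.getElem_map, List.getElem_range, Function.comp_apply,
      List.getElem_rotate]
    have h1 : (s : Int) + (0 + (p : Int)) = ((s + p : Nat) : Int) := by push_cast; ring
    rw [h1, PySem.Int.mod_natCast, PySem.List.pyGetD_natCast]
    have hlt : (s + p) % cycle.length < cycle.length := Nat.mod_lt _ (by omega)
    rw [List.getD_eq_getElem _ _ hlt]
    congr 1
    rw [Nat.add_comm]

-- the counter loop finds the first occurrence
lemma pvFindRot_eq (coin : String) (cycle : List String) :
    ∀ (rest : List String) (counter : Int), coin ∈ rest →
      pvFindRot coin cycle rest counter = pvRotBuild cycle (counter + (rest.idxOf coin : Int)) := by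
  intro rest
  induction rest with
  | nil => intro counter h; simp at h
  | cons c t ih =>
    intro counter h
    by_cases hc : coin = c
    · subst hc
      simp [pvFindRot, List.idxOf_cons_self]
    · have ht : coin ∈ t := by
        rcases List.mem_cons.mp h with h' | h'
        · exact absurd h' hc
        · exact h'
      rw [show pvFindRot coin cycle (c :: t) counter = pvFindRot coin cycle t (counter + 1) from by
        simp [pvFindRot, hc]]
      rw [ih (counter + 1) ht]
      rw [List.idxOf_cons_ne _ (fun e => hc e.symm)]
      congr 1
      push_cast
      ring

-- once rotated_cycle is nonempty the remaining coin iterations do nothing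
lemma pvFoldl_stay (cs : List String) (cycle rot : List String) (h : rot.length ≠ 0) :
    cs.foldl (pvCoinStep cycle) rot = rot := by
  induction cs with
  | nil => rfl
  | cons c t ih =>
    rw [List.foldl_cons, show pvCoinStep cycle rot c = rot from by simp [pvCoinStep, h]]
    exact ih

lemma pvRotA_first (cycle : List String) (cs : List String) (coin : String) (h : coin ∈ cycle)
    (hne : (pvFindRot coin cycle cycle 0).length ≠ 0) :
    (coin :: cs).foldl (pvCoinStep cycle) [] = pvFindRot coin cycle cycle 0 := by
  rw [List.foldl_cons, show pvCoinStep cycle [] coin = pvFindRot coin cycle cycle 0 from by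
    simp [pvCoinStep, h]]
  exact pvFoldl_stay cs cycle _ hne

lemma pvRotA_skip (cycle : List String) (cs : List String) (coin : String) (h : coin ∉ cycle) :
    (coin :: cs).foldl (pvCoinStep cycle) [] = cs.foldl (pvCoinStep cycle) [] := by
  rw [List.foldl_cons, show pvCoinStep cycle [] coin = [] from by simp [pvCoinStep, h]]

-- B's argmin pass: an accumulator already at the minimum rank is never replaced
lemma pvBest_stay (r : Int) (j : Int) :
    ∀ (xs : List String) (i : Int),
      (∀ c ∈ xs, ∀ r', pvRank.get? c = some r' → r ≤ r') →
      (PySem.List.enumerate xs i).foldl pvBestStep (some (r, j)) = some (r, j) := by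
  intro xs
  induction xs with
  | nil => intro i _; simp [PySem.List.enumerate_nil]
  | cons c t ih =>
    intro i hm
    rw [PySem.List.enumerate_cons, List.foldl_cons]
    have hstep : pvBestStep (some (r, j)) (i, c) = some (r, j) := by
      rcases hR : pvRank.get? c with _ | r'
      · simp [pvBestStep, hR]
      · have := hm c List.mem_cons_self r' hR
        simp [pvBestStep, hR, not_lt.mpr this]
    rw [hstep]
    exact ih (i + 1) (fun c' hc' => hm c' (List.mem_cons_of_mem _ hc'))

lemma pvBest_nil : ∀ (xs : List String) (i : Int),
    (∀ c ∈ xs, pvRank.get? c = none) →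
    (PySem.List.enumerate xs i).foldl pvBestStep none = none := by
  intro xs
  induction xs with
  | nil => intro i _; simp [PySem.List.enumerate_nil]
  | cons c t ih =>
    intro i hm
    rw [PySem.List.enumerate_cons, List.foldl_cons]
    rw [show pvBestStep none (i, c) = none from by
      simp [pvBestStep, hm c List.mem_cons_self]]
    exact ih (i + 1) (fun c' hc' => hm c' (List.mem_cons_of_mem _ hc'))

-- B's argmin pass finds (min rank, first index of its coin)
lemma pvBest_fold (k : String) (r : Int) :
    ∀ (xs : List String) (i : Int) (acc : Option (Int × Int)),
      k ∈ xs → pvRank.get? k = some r →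
      (∀ c ∈ xs, ∀ r', pvRank.get? c = some r' → r ≤ r') →
      (∀ c, pvRank.get? c = some r → c = k) →
      (acc = none ∨ ∃ p, acc = some p ∧ r < p.1) →
      (PySem.List.enumerate xs i).foldl pvBestStep acc = some (r, i + (xs.idxOf k : Int)) := by
  intro xs
  induction xs with
  | nil => intro i acc h; simp at h
  | cons c t ih =>
    intro i acc hk hRk hmin hinj hacc
    rw [PySem.List.enumerate_cons, List.foldl_cons]
    by_cases hc : c = k
    · subst hc
      have hstep : pvBestStep acc (i, c) = some (r, i) := by
        rcases hacc with h | ⟨p, hp, hlt⟩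
        · subst h; simp [pvBestStep, hRk]
        · subst hp; simp [pvBestStep, hRk, hlt]
      rw [hstep, List.idxOf_cons_self]
      rw [pvBest_stay r i t (i + 1)
        (fun c' hc' r' hR' => hmin c' (List.mem_cons_of_mem _ hc') r' hR')]
      simp
    · have hkt : k ∈ t := by
        rcases List.mem_cons.mp hk with h' | h'
        · exact absurd h'.symm hc
        · exact h'
      have hinv : pvBestStep acc (i, c) = none ∨
          ∃ p, pvBestStep acc (i, c) = some p ∧ r < p.1 := by
        rcases hR : pvRank.get? c with _ | r'
        · rcases hacc with h | ⟨p, hp, hlt⟩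
          · subst h; exact Or.inl (by simp [pvBestStep, hR])
          · subst hp; exact Or.inr ⟨p, by simp [pvBestStep, hR], hlt⟩
        · have hle : r ≤ r' := hmin c List.mem_cons_self r' hR
          have hne : r' ≠ r := fun e => hc (hinj c (e ▸ hR))
          have hrlt : r < r' := lt_of_le_of_ne hle (fun e => hne e.symm)
          rcases hacc with h | ⟨p, hp, hlt⟩
          · subst h; exact Or.inr ⟨(r', i), by simp [pvBestStep, hR], hrlt⟩
          · subst hp
            by_cases hcmp : r' < p.1
            · exact Or.inr ⟨(r', i), by simp [pvBestStep, hR, hcmp], hrlt⟩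
            · exact Or.inr ⟨p, by simp [pvBestStep, hR, hcmp], hlt⟩
      rw [ih (i + 1) _ hkt hRk
        (fun c' hc' r' hR' => hmin c' (List.mem_cons_of_mem _ hc') r' hR') hinj hinv]
      rw [List.idxOf_cons_ne _ hc]
      congr 1
      push_cast
      ring

-- when coin k (of minimal rank r) is present, both sides produce the same rotation
lemma pvCase_present (cycle : List String) (k : String) (r : Int)
    (hk : k ∈ cycle) (hRk : pvRank.get? k = some r)
    (hmin : ∀ c ∈ cycle, ∀ r', pvRank.get? c = some r' → r ≤ r')
    (hinj : ∀ c, pvRank.get? c = some r → c = k) :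
    pvFindRot k cycle cycle 0 = pvRotB cycle := by
  have hidx : cycle.idxOf k < cycle.length := List.idxOf_lt_length_of_mem hk
  rw [pvFindRot_eq k cycle cycle 0 hk, zero_add, pvRotBuild_eq _ _ hidx]
  unfold pvRotB pvBest
  rw [pvBest_fold k r cycle 0 none hk hRk hmin hinj (Or.inl rfl), zero_add]
  simp [PySem.List.slice_from_natCast, PySem.List.slice_to_natCast]

lemma pvRotA_eq_pvRotB (cycle : List String) : pvRotA cycle = pvRotB cycle := by
  have hne : ∀ k, k ∈ cycle → (pvFindRot k cycle cycle 0).length ≠ 0 := by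
    intro k hk
    rw [pvFindRot_eq k cycle cycle 0 hk, zero_add,
      pvRotBuild_eq _ _ (List.idxOf_lt_length_of_mem hk)]
    have hlt := List.idxOf_lt_length_of_mem hk
    rw [List.length_append, List.length_drop, List.length_take]
    omega
  unfold pvRotA pvCoins
  by_cases h1 : "ETH" ∈ cycle
  · rw [pvRotA_first cycle _ _ h1 (hne _ h1)]
    refine pvCase_present cycle "ETH" 0 h1 (by rfl) ?_ ?_
    · intro c hc r' hR
      rcases pvRank_cases c r' hR with ⟨hc', hr⟩|⟨hc', hr⟩|⟨hc', hr⟩|⟨hc', hr⟩|⟨hc', hr⟩|⟨hc', hr⟩|⟨hc', hr⟩ <;> subst hc' <;>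
        first | omega | omega | omega | omega | omega | omega | omega
    · intro c hR
      rcases pvRank_cases c 0 hR with ⟨hc', hr⟩|⟨hc', hr⟩|⟨hc', hr⟩|⟨hc', hr⟩|⟨hc', hr⟩|⟨hc', hr⟩|⟨hc', hr⟩ <;>
        first | exact hc' | (exfalso; omega)
  · rw [pvRotA_skip cycle _ _ h1]
    by_cases h2 : "USDC" ∈ cycle
    · rw [pvRotA_first cycle _ _ h2 (hne _ h2)]
      refine pvCase_present cycle "USDC" 1 h2 (by rfl) ?_ ?_
      · intro c hc r' hR
        rcases pvRank_cases c r' hR with ⟨hc', hr⟩|⟨hc', hr⟩|⟨hc', hr⟩|⟨hc', hr⟩|⟨hc', hr⟩|⟨hc', hr⟩|⟨hc', hr⟩ <;> subst hc' <;>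
          first | (exact absurd hc h1) | omega | omega | omega | omega | omega | omega
      · intro c hR
        rcases pvRank_cases c 1 hR with ⟨hc', hr⟩|⟨hc', hr⟩|⟨hc', hr⟩|⟨hc', hr⟩|⟨hc', hr⟩|⟨hc', hr⟩|⟨hc', hr⟩ <;>
          first | exact hc' | (exfalso; omega)
    · rw [pvRotA_skip cycle _ _ h2]
      by_cases h3 : "USDT" ∈ cycle
      · rw [pvRotA_first cycle _ _ h3 (hne _ h3)]
        refine pvCase_present cycle "USDT" 2 h3 (by rfl) ?_ ?_
        · intro c hc r' hR
          rcases pvRank_cases c r' hR with ⟨hc', hr⟩|⟨hc', hr⟩|⟨hc', hr⟩|⟨hc', hr⟩|⟨hc', hr⟩|⟨hc', hr⟩|⟨hc', hr⟩ <;> subst hc' <;>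
            first | (exact absurd hc h1) | (exact absurd hc h2) | omega | omega | omega | omega | omega
        · intro c hR
          rcases pvRank_cases c 2 hR with ⟨hc', hr⟩|⟨hc', hr⟩|⟨hc', hr⟩|⟨hc', hr⟩|⟨hc', hr⟩|⟨hc', hr⟩|⟨hc', hr⟩ <;>
            first | exact hc' | (exfalso; omega)
      · rw [pvRotA_skip cycle _ _ h3]
        by_cases h4 : "DAI" ∈ cycle
        · rw [pvRotA_first cycle _ _ h4 (hne _ h4)]
          refine pvCase_present cycle "DAI" 3 h4 (by rfl) ?_ ?_
          · intro c hc r' hR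
            rcases pvRank_cases c r' hR with ⟨hc', hr⟩|⟨hc', hr⟩|⟨hc', hr⟩|⟨hc', hr⟩|⟨hc', hr⟩|⟨hc', hr⟩|⟨hc', hr⟩ <;> subst hc' <;>
              first | (exact absurd hc h1) | (exact absurd hc h2) | (exact absurd hc h3) | omega | omega | omega | omega
          · intro c hR
            rcases pvRank_cases c 3 hR with ⟨hc', hr⟩|⟨hc', hr⟩|⟨hc', hr⟩|⟨hc', hr⟩|⟨hc', hr⟩|⟨hc', hr⟩|⟨hc', hr⟩ <;>
              first | exact hc' | (exfalso; omega)
        · rw [pvRotA_skip cycle _ _ h4]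
          by_cases h5 : "WBTC" ∈ cycle
          · rw [pvRotA_first cycle _ _ h5 (hne _ h5)]
            refine pvCase_present cycle "WBTC" 4 h5 (by rfl) ?_ ?_
            · intro c hc r' hR
              rcases pvRank_cases c r' hR with ⟨hc', hr⟩|⟨hc', hr⟩|⟨hc', hr⟩|⟨hc', hr⟩|⟨hc', hr⟩|⟨hc', hr⟩|⟨hc', hr⟩ <;> subst hc' <;>
                first | (exact absurd hc h1) | (exact absurd hc h2) | (exact absurd hc h3) | (exact absurd hc h4) | omega | omega | omega
            · intro c hR
              rcases pvRank_cases c 4 hR with ⟨hc', hr⟩|⟨hc', hr⟩|⟨hc', hr⟩|⟨hc', hr⟩|⟨hc', hr⟩|⟨hc', hr⟩|⟨hc', hr⟩ <;>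
                first | exact hc' | (exfalso; omega)
          · rw [pvRotA_skip cycle _ _ h5]
            by_cases h6 : "UNI" ∈ cycle
            · rw [pvRotA_first cycle _ _ h6 (hne _ h6)]
              refine pvCase_present cycle "UNI" 5 h6 (by rfl) ?_ ?_
              · intro c hc r' hR
                rcases pvRank_cases c r' hR with ⟨hc', hr⟩|⟨hc', hr⟩|⟨hc', hr⟩|⟨hc', hr⟩|⟨hc', hr⟩|⟨hc', hr⟩|⟨hc', hr⟩ <;> subst hc' <;>
                  first | (exact absurd hc h1) | (exact absurd hc h2) | (exact absurd hc h3) | (exact absurd hc h4) | (exact absurd hc h5) | omega | omega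
              · intro c hR
                rcases pvRank_cases c 5 hR with ⟨hc', hr⟩|⟨hc', hr⟩|⟨hc', hr⟩|⟨hc', hr⟩|⟨hc', hr⟩|⟨hc', hr⟩|⟨hc', hr⟩ <;>
                  first | exact hc' | (exfalso; omega)
            · rw [pvRotA_skip cycle _ _ h6]
              by_cases h7 : "SUSHI" ∈ cycle
              · rw [pvRotA_first cycle _ _ h7 (hne _ h7)]
                refine pvCase_present cycle "SUSHI" 6 h7 (by rfl) ?_ ?_
                · intro c hc r' hR
                  rcases pvRank_cases c r' hR with ⟨hc', hr⟩|⟨hc', hr⟩|⟨hc', hr⟩|⟨hc', hr⟩|⟨hc', hr⟩|⟨hc', hr⟩|⟨hc', hr⟩ <;> subst hc' <;>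
                    first | (exact absurd hc h1) | (exact absurd hc h2) | (exact absurd hc h3) | (exact absurd hc h4) | (exact absurd hc h5) | (exact absurd hc h6) | omega
                · intro c hR
                  rcases pvRank_cases c 6 hR with ⟨hc', hr⟩|⟨hc', hr⟩|⟨hc', hr⟩|⟨hc', hr⟩|⟨hc', hr⟩|⟨hc', hr⟩|⟨hc', hr⟩ <;>
                    first | exact hc' | (exfalso; omega)
              · rw [pvRotA_skip cycle _ _ h7]
                have hall : ∀ c ∈ cycle, pvRank.get? c = none := by
                  intro c hc
                  cases hR : pvRank.get? c with
                  | none => rfl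
                  | some r =>
                    exfalso
                    rcases pvRank_cases c r hR with ⟨hc', hr⟩|⟨hc', hr⟩|⟨hc', hr⟩|⟨hc', hr⟩|⟨hc', hr⟩|⟨hc', hr⟩|⟨hc', hr⟩ <;> subst hc' <;>
                      first | (exact h1 hc) | (exact h2 hc) | (exact h3 hc) | (exact h4 hc) | (exact h5 hc) | (exact h6 hc) | (exact h7 hc)
                unfold pvRotB pvBest
                rw [pvBest_nil cycle 0 hall]
                rfl

-- ===== VERDICT (by name: the statement is the Claim_ definition above) =====
theorem sort_cycles_spec : Claim_equal_sort_cycles := by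
  intro cycles _
  unfold Spec_sort_cycles sort_cycles sort_cycles_alt
  rw [funext pvRotA_eq_pvRotB]
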